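-- pv_equiv track=rewrite | github.com/sheylamtnezc/proyecto_icd_pro | mipymes/utils.py | frecuencia_acumulada
-- ===== SOURCE A (Python) =====
-- def conteo_categorias(categorias):
--     conteo = {}
--     for categoria in categorias:
--         conteo[categoria] = conteo.get(categoria, 0) + 1
--     return conteo
--
-- def frecuencia_acumulada(categorias):
--     conteo = conteo_categorias(categorias)
--     categorias_ordenadas = sorted(conteo.keys())
--     frecuencia_acum = {}
--     acum = 0
--     for categoria in categorias_ordenadas:
--         acum += conteo[categoria]
--         frecuencia_acum[categoria] = acum
--     return frecuencia_acum
-- ===== SOURCE B (Python) =====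
-- def frecuencia_acumulada(categorias):
--     frecuencia_acum = {}
--     acum = 0
--     for categoria in sorted(categorias):
--         acum += 1
--         frecuencia_acum[categoria] = acum
--     return frecuencia_acum
-- ===== Notes on version B (the rewrite author's own statement) =====
-- stated objective: simpler
-- what changed: B builds no count table: it sorts the whole list once and makes a single pass with a running counter, overwriting each key's dict entry so the last write per group is its cumulative frequency; A builds a count dict, sorts the distinct keys, then accumulates counts.
import Mathlib
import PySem

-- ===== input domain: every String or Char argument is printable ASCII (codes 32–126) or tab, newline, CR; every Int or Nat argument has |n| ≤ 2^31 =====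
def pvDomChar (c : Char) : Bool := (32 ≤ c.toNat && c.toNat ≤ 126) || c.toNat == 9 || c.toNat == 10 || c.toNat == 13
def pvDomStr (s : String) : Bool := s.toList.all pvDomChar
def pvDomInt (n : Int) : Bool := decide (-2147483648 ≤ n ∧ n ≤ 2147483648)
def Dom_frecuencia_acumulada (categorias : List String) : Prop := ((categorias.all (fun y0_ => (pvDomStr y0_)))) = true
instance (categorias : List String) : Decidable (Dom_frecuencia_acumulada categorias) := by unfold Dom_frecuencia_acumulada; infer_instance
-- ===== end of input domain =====

-- B replaces A's count-dict + sort-of-distinct-keys + accumulate-counts pipeline by a single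
-- counting pass over the fully sorted input (objective: simpler, same asymptotic cost).

-- ===== PORT A =====
def conteo_categorias (categorias : List String) : PySem.Dict String Int :=
  categorias.foldl (fun conteo categoria => conteo.insert categoria (conteo.getD categoria 0 + 1)) PySem.Dict.empty

def frecuencia_acumulada (categorias : List String) : List (String × Int) :=
  let conteo := conteo_categorias categorias
  let categorias_ordenadas := PySem.List.sorted conteo.keys (fun x => x)
  let res := categorias_ordenadas.foldl
      (fun (st : PySem.Dict String Int × Int) categoria =>
        (st.1.insert categoria (st.2 + conteo.getD categoria 0), st.2 + conteo.getD categoria 0))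
      (PySem.Dict.empty, 0)
  res.1.items

-- ===== PORT B =====
def frecuencia_acumulada_alt (categorias : List String) : List (String × Int) :=
  let res := (PySem.List.sorted categorias (fun x => x)).foldl
      (fun (st : PySem.Dict String Int × Int) categoria =>
        (st.1.insert categoria (st.2 + 1), st.2 + 1))
      (PySem.Dict.empty, 0)
  res.1.items

-- ===== PRECONDITION & SPEC =====
def Spec_frecuencia_acumulada (categorias : List String) (out : List (String × Int)) : Prop := out = frecuencia_acumulada_alt categorias
instance (categorias : List String) (out : List (String × Int)) : Decidable (Spec_frecuencia_acumulada categorias out) := by unfold Spec_frecuencia_acumulada; infer_instance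

-- ===== CLAIM (what is proved, stated in full; the proofs are below) =====
def Claim_equal_frecuencia_acumulada : Prop := ∀ (categorias : List String), Dom_frecuencia_acumulada categorias → Spec_frecuencia_acumulada categorias (frecuencia_acumulada categorias)

-- ===== LEMMAS AND PROOFS =====

-- the (key, running-total) list produced by A's accumulation loop over keys u, starting at a
def presum (g : String → Int) : List String → Int → List (String × Int)
  | [], _ => []
  | c :: t, a => (c, a + g c) :: presum g t (a + g c)

theorem presum_congr (g g' : String → Int) (u : List String) (a : Int)
    (h : ∀ k ∈ u, g k = g' k) : presum g u a = presum g' u a := by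
  induction u generalizing a with
  | nil => rfl
  | cons c t ih =>
      have hc := h c (by simp)
      simp only [presum, hc]
      exact congrArg _ (ih (a + g' c) (fun k hk => h k (by simp [hk])))

theorem countP_split (l : List String) (p q : String → Bool) :
    l.countP p = l.countP (fun x => p x && q x) + l.countP (fun x => p x && !q x) := by
  induction l with
  | nil => rfl
  | cons x t ih =>
      cases hp : p x <;> cases hq : q x <;>
        simp [hp, hq, ih] <;> omega

theorem presum_spec (u : List String) (cats : List String) (a : Int)
    (hpw : u.Pairwise (· < ·)) (hmem : ∀ x ∈ cats, x ∈ u) :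
    presum (fun c => (cats.count c : Int)) u a
      = u.map (fun k => (k, a + (cats.countP (fun x => decide (x ≤ k)) : Int))) := by
  induction u generalizing cats a with
  | nil => rfl
  | cons c t ih =>
      have hct : ∀ x ∈ t, c < x := fun x hx => List.rel_of_pairwise_cons hpw hx
      have hpt : t.Pairwise (· < ·) := hpw.of_cons
      -- head: count of c = number of elements ≤ c
      have hhead : cats.count c = cats.countP (fun x => decide (x ≤ c)) := by
        rw [List.count_eq_countP]
        refine List.countP_congr (fun x hx => ?_)
        simp only [beq_iff_eq, decide_eq_true_eq]
        rcases List.mem_cons.mp (hmem x hx) with h | h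
        · subst h; simp
        · exact ⟨fun he => le_of_eq he, fun hle => absurd hle (not_le.mpr (hct x h))⟩
      -- tail: pass to cats with all copies of c removed
      have hcongr : presum (fun k => (cats.count k : Int)) t (a + cats.count c)
          = presum (fun k => ((cats.filter (fun x => !(x == c))).count k : Int)) t (a + cats.count c) := by
        refine presum_congr _ _ _ _ (fun k hk => ?_)
        have hkc : k ≠ c := (hct k hk).ne'
        rw [List.count_filter (by simp [hkc])]
      have hmem' : ∀ x ∈ cats.filter (fun x => !(x == c)), x ∈ t := by
        intro x hx
        rw [List.mem_filter] at hx
        rcases List.mem_cons.mp (hmem x hx.1) with h | h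
        · simp_all
        · exact h
      have htail := ih (cats.filter (fun x => !(x == c))) (a + cats.count c) hpt hmem'
      simp only [presum, List.map_cons]
      refine congrArg₂ List.cons (by rw [hhead]) ?_
      rw [hcongr, htail]
      refine List.map_congr_left (fun k hk => ?_)
      have hck : c < k := hct k hk
      have hsplit := countP_split cats (fun x => decide (x ≤ k)) (fun x => x == c)
      have hcc : cats.countP (fun x => decide (x ≤ k) && (x == c)) = cats.count c := by
        rw [List.count_eq_countP]
        refine List.countP_congr (fun x hx => ?_)
        simp only [beq_iff_eq, Bool.and_eq_true, decide_eq_true_eq]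
        exact ⟨fun hb => hb.2, fun he => ⟨he ▸ le_of_lt hck, he⟩⟩
      have hfil : (cats.filter (fun x => !(x == c))).countP (fun x => decide (x ≤ k))
          = cats.countP (fun x => decide (x ≤ k) && !(x == c)) := List.countP_filter
      simp only [Prod.mk.injEq, true_and, hfil]
      rw [hsplit, hcc]
      push_cast
      ring

theorem foldA_items (n : PySem.Dict String Int) (u : List String) :
    ∀ (d : PySem.Dict String Int) (a : Int), u.Nodup → (∀ c ∈ u, d.contains c = false) →
    ((u.foldl (fun (st : PySem.Dict String Int × Int) c =>
        (st.1.insert c (st.2 + n.getD c 0), st.2 + n.getD c 0)) (d, a)).1).items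
      = d.items ++ presum (fun c => n.getD c 0) u a := by
  induction u with
  | nil => intro d a _ _; simp [presum]
  | cons c t ih =>
      intro d a hnd hfresh
      have hc : d.contains c = false := hfresh c (by simp)
      have hfresh' : ∀ c' ∈ t, (d.insert c (a + n.getD c 0)).contains c' = false := by
        intro c' hc'
        rw [PySem.Dict.contains_insert]
        have : c' ≠ c := fun h => (List.nodup_cons.mp hnd).1 (h ▸ hc')
        simp [this, hfresh c' (by simp [hc'])]
      have := ih (d.insert c (a + n.getD c 0)) (a + n.getD c 0) (List.nodup_cons.mp hnd).2 hfresh'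
      simp only [List.foldl_cons, this, PySem.Dict.items_insert_of_not_contains d _ hc, presum]
      simp

theorem foldB_getD_not_mem (s : List String) :
    ∀ (d : PySem.Dict String Int) (a : Int) (k : String), k ∉ s →
    ((s.foldl (fun (st : PySem.Dict String Int × Int) c =>
        (st.1.insert c (st.2 + 1), st.2 + 1)) (d, a)).1).getD k 0 = d.getD k 0 := by
  induction s with
  | nil => intro d a k _; rfl
  | cons c t ih =>
      intro d a k hk
      have hkc : k ≠ c := fun h => hk (by simp [h])
      have hkt : k ∉ t := fun h => hk (by simp [h])
      simp only [List.foldl_cons, ih _ _ _ hkt, PySem.Dict.getD_insert, if_neg hkc]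

theorem foldB_getD_mem (s : List String) :
    ∀ (d : PySem.Dict String Int) (a : Int) (k : String), s.Pairwise (· ≤ ·) → k ∈ s →
    ((s.foldl (fun (st : PySem.Dict String Int × Int) c =>
        (st.1.insert c (st.2 + 1), st.2 + 1)) (d, a)).1).getD k 0
      = a + (s.countP (fun x => decide (x ≤ k)) : Int) := by
  induction s with
  | nil => intro _ _ _ _ h; cases h
  | cons c t ih =>
      intro d a k hpw hk
      have hct : ∀ x ∈ t, c ≤ x := fun x hx => List.rel_of_pairwise_cons hpw hx
      by_cases hkt : k ∈ t
      · have hck : c ≤ k := hct k hkt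
        have := ih (d.insert c (a + 1)) (a + 1) k hpw.of_cons hkt
        simp only [List.foldl_cons, this, List.countP_cons]
        simp [hck]
        ring
      · have hkc : k = c := by rcases List.mem_cons.mp hk with h | h; exact h; exact absurd h hkt
        subst hkc
        have hzero : t.countP (fun x => decide (x ≤ k)) = 0 := by
          rw [List.countP_eq_zero]
          intro x hx hle
          exact hkt ((le_antisymm (by simpa using hle) (hct x hx)) ▸ hx)
        simp only [List.foldl_cons, foldB_getD_not_mem t _ _ _ hkt,
          PySem.Dict.getD_insert, List.countP_cons, hzero]
        simp

theorem foldB_keys (s : List String) :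
    ∀ (d : PySem.Dict String Int) (a : Int),
    ((s.foldl (fun (st : PySem.Dict String Int × Int) c =>
        (st.1.insert c (st.2 + 1), st.2 + 1)) (d, a)).1).keys = PySem.Set.update d.keys s := by
  induction s with
  | nil => intro d a; rfl
  | cons c t ih =>
      intro d a
      have hkeys : (d.insert c (a + 1)).keys = PySem.Set.add d.keys c := by
        by_cases hm : c ∈ d.keys
        · rw [PySem.Dict.keys_insert_of_contains d _ ((PySem.Dict.contains_iff_mem_keys d c).mpr hm)]
          simp [PySem.Set.add, PySem.Set.contains, hm]
        · rw [PySem.Dict.keys_insert_of_not_contains d _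
            (by simp [PySem.Dict.contains_eq_decide_mem_keys, hm])]
          simp [PySem.Set.add, PySem.Set.contains, hm]
      simp only [List.foldl_cons, ih, hkeys]
      rfl

theorem foldl_add_sublist (xs : List String) :
    ∀ (s : List String), (xs.foldl PySem.Set.add s).Sublist (s ++ xs) := by
  induction xs with
  | nil => intro s; simp
  | cons c t ih =>
      intro s
      have h1 := ih (PySem.Set.add s c)
      have h2 : (PySem.Set.add s c ++ t).Sublist (s ++ c :: t) := by
        by_cases hc : PySem.Set.contains s c = true
        · simp only [PySem.Set.add, hc, if_pos]
          refine List.Sublist.append (List.Sublist.refl s) (List.sublist_cons_of_sublist c (List.Sublist.refl t))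
        · simp only [PySem.Set.add, hc]
          simp
      exact h1.trans h2

theorem ofList_sublist (s : List String) : (PySem.Set.ofList s).Sublist s := by
  simpa [PySem.Set.ofList] using foldl_add_sublist s []

-- both programs compute: the sorted distinct values, each paired with the number of inputs ≤ it
theorem A_eq (cats : List String) :
    frecuencia_acumulada cats
      = (PySem.List.sorted (PySem.Set.ofList cats) (fun x => x)).map
          (fun k => (k, 0 + (cats.countP (fun x => decide (x ≤ k)) : Int))) := by
  simp only [frecuencia_acumulada]
  have hconteo : conteo_categorias cats = PySem.Dict.counter cats := by
    unfold conteo_categorias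
    exact PySem.Dict.foldl_insert_getD_add_one_eq_counter cats
  rw [hconteo, PySem.Dict.keys_counter]
  have hpwlt := PySem.List.sorted_ofList_pairwise_lt cats
  have hnodup : (PySem.List.sorted (PySem.Set.ofList cats) (fun x => x)).Nodup :=
    hpwlt.imp (fun h => ne_of_lt h)
  rw [foldA_items (PySem.Dict.counter cats) _ PySem.Dict.empty 0 hnodup
      (fun c _ => PySem.Dict.contains_empty c)]
  rw [presum_congr _ (fun c => ((cats.count c : Int)))
      _ 0 (fun k _ => PySem.Dict.getD_counter cats k)]
  rw [presum_spec _ cats 0 hpwlt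
      (fun x hx => (PySem.List.mem_sorted _ _ _ x).mpr ((PySem.Set.mem_ofList cats x).mpr hx))]
  rfl

theorem B_eq (cats : List String) :
    frecuencia_acumulada_alt cats
      = (PySem.List.sorted (PySem.Set.ofList cats) (fun x => x)).map
          (fun k => (k, 0 + (cats.countP (fun x => decide (x ≤ k)) : Int))) := by
  simp only [frecuencia_acumulada_alt]
  have hkeys : ((PySem.List.sorted cats (fun x => x)).foldl
      (fun (st : PySem.Dict String Int × Int) c =>
        (st.1.insert c (st.2 + 1), st.2 + 1)) (PySem.Dict.empty, 0)).1.keys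
      = PySem.Set.ofList (PySem.List.sorted cats (fun x => x)) := by
    rw [foldB_keys, PySem.Dict.keys_empty]
    rfl
  have hnodupk := hkeys ▸ PySem.Set.nodup_ofList (PySem.List.sorted cats (fun x => x))
  rw [PySem.Dict.items_eq_map_keys _ hnodupk 0, hkeys]
  have hple : (PySem.List.sorted cats (fun x => x)).Pairwise (· ≤ ·) := by
    simpa using PySem.List.sorted_pairwise cats (fun x => x)
  have hple' : (PySem.Set.ofList (PySem.List.sorted cats (fun x => x))).Pairwise (· ≤ ·) :=
    List.Pairwise.sublist (ofList_sublist _) hple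
  have hne : (PySem.Set.ofList (PySem.List.sorted cats (fun x => x))).Pairwise (· ≠ ·) :=
    PySem.Set.nodup_ofList _
  have hpwlt : (PySem.Set.ofList (PySem.List.sorted cats (fun x => x))).Pairwise (· < ·) :=
    (hple'.and hne).imp (fun h => lt_of_le_of_ne h.1 h.2)
  have hperm : (PySem.Set.ofList (PySem.List.sorted cats (fun x => x))).Perm
      (PySem.Set.ofList cats) := by
    rw [List.perm_ext_iff_of_nodup (PySem.Set.nodup_ofList _) (PySem.Set.nodup_ofList _)]
    intro x
    rw [PySem.Set.mem_ofList, PySem.Set.mem_ofList, PySem.List.mem_sorted]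
  have hueq : PySem.List.sorted (PySem.Set.ofList cats) (fun x => x)
      = PySem.Set.ofList (PySem.List.sorted cats (fun x => x)) :=
    PySem.List.sorted_eq_of_perm_of_pairwise_lt _ _ _ hperm hpwlt
  rw [← hueq]
  refine List.map_congr_left (fun k hk => ?_)
  have hks : k ∈ PySem.List.sorted cats (fun x => x) := by
    rw [hueq] at hk
    exact (PySem.Set.mem_ofList _ k).mp hk
  rw [foldB_getD_mem _ PySem.Dict.empty 0 k hple hks]
  rw [(PySem.List.sorted_perm cats (fun x => x) false).countP_eq]

-- ===== VERDICT (by name: the statement is the Claim_ definition above) =====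
theorem frecuencia_acumulada_spec : Claim_equal_frecuencia_acumulada := by
  intro categorias _
  unfold Spec_frecuencia_acumulada
  rw [A_eq, B_eq]
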